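-- pv_equiv track=rewrite | github.com/cheaheekyung/Code-Kata | 프로그래머스/0/120922. 종이 자르기/종이 자르기.py | solution
-- ===== SOURCE A (Python) =====
-- def solution(M, N):
--     answer = 0
--     oM = M
--     countM = 0
--     countN = 0
--
--     while M > 1 :
--         M = M - 1
--         countM += 1
--
--     while N > 1 :
--         N = N - 1
--         countN += 1
--
--     answer = (oM*countN)+countM
--     return answer
-- ===== SOURCE B (Python) =====
-- def solution(M, N):
--     # closed form: each loop counts max(x-1, 0) steps
--     return M * max(N - 1, 0) + max(M - 1, 0)
-- ===== Notes on version B (the rewrite author's own statement) =====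
-- stated objective: faster
-- what changed: Replaced the two decrement-counting while loops by the closed form M*max(N-1,0)+max(M-1,0).
import Mathlib
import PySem

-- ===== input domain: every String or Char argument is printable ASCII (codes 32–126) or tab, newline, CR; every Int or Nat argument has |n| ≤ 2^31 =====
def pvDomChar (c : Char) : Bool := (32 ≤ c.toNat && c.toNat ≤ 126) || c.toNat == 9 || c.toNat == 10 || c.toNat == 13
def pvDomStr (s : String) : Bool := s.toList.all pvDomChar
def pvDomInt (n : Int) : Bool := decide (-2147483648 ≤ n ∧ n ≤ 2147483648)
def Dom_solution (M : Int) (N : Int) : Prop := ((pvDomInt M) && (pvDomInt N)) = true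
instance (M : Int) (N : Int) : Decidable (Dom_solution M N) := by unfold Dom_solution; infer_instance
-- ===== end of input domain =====

-- B replaces A's two decrement-counting loops by a closed form (faster: O(1) vs O(M+N)).

-- ===== PORT A =====
-- 'while x > 1: x -= 1; count += 1' as structural recursion on x.toNat
def solutionLoop (x : Int) (count : Int) : Int × Int :=
  if x > 1 then solutionLoop (x - 1) (count + 1) else (x, count)
termination_by x.toNat
decreasing_by omega

def solution (M : Int) (N : Int) : Int :=
  let oM := M
  let (_, countM) := solutionLoop M 0
  let (_, countN) := solutionLoop N 0
  (oM * countN) + countM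

-- ===== PORT B =====
def solution_alt (M : Int) (N : Int) : Int :=
  M * max (N - 1) 0 + max (M - 1) 0

-- ===== PRECONDITION & SPEC =====
def Spec_solution (M : Int) (N : Int) (out : Int) : Prop := out = solution_alt M N
instance (M : Int) (N : Int) (out : Int) : Decidable (Spec_solution M N out) := by unfold Spec_solution; infer_instance

-- ===== CLAIM (what is proved, stated in full; the proofs are below) =====
def Claim_equal_solution : Prop := ∀ (M : Int) (N : Int), Dom_solution M N → Spec_solution M N (solution M N)

-- ===== LEMMAS AND PROOFS =====
theorem solutionLoop_count (x : Int) (c : Int) :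
    (solutionLoop x c).2 = c + max (x - 1) 0 := by
  rw [solutionLoop]
  split
  · rw [solutionLoop_count (x - 1) (c + 1)]; omega
  · simp; omega
termination_by x.toNat
decreasing_by omega

-- ===== VERDICT (by name: the statement is the Claim_ definition above) =====
theorem solution_spec : Claim_equal_solution := by
  intro M N _
  unfold Spec_solution solution solution_alt
  show M * (solutionLoop N 0).2 + (solutionLoop M 0).2 = M * max (N - 1) 0 + max (M - 1) 0
  rw [solutionLoop_count M 0, solutionLoop_count N 0]
  ring
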